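-- pv_equiv track=rewrite | github.com/jurogrammer/studying | Algorithm/[프로그래머스]뉴스클러스터링.py | GetUnionNum
-- ===== SOURCE A (Python) =====
-- def GetUnionNum(multiSet1, multiSet2):
--     total = 0
--     visited = set()
--     for m1 in multiSet1:
--         if m1 in multiSet2:
--             total += max(multiSet1[m1], multiSet2[m1])
--             visited.add(m1)
--         else:
--             total += multiSet1[m1]
--
--     for m2 in multiSet2:
--         if m2 in visited:
--             continue
--         total += multiSet2[m2]
--
--     return total
-- ===== SOURCE B (Python) =====
-- def GetUnionNum(multiSet1, multiSet2):
--     overlap = sum(min(v, multiSet2[k]) for k, v in multiSet1.items() if k in multiSet2)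
--     return sum(multiSet1.values()) + sum(multiSet2.values()) - overlap
-- ===== Notes on version B (the rewrite author's own statement) =====
-- stated objective: simpler
-- what changed: Replaced the two-pass loop with a mutated visited set by the arithmetic identity sum(values1) + sum(values2) - sum of per-key minima over shared keys (max(a,b) = a + b - min(a,b)).
import Mathlib
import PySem

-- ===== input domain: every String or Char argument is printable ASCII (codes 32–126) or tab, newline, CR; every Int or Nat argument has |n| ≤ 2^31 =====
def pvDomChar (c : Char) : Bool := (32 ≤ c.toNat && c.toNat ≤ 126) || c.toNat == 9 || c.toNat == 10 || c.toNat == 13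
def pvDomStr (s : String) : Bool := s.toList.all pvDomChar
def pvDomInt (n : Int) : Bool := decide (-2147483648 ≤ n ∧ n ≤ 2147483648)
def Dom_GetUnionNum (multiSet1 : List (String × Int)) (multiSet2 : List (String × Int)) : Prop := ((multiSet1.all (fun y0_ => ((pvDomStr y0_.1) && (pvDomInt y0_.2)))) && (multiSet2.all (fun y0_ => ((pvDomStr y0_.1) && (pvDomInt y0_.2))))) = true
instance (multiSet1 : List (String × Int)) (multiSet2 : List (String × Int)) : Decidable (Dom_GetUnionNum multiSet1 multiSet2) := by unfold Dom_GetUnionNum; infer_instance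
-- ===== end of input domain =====

-- B replaces A's two-pass visited-set accumulation by the identity sum1 + sum2 - overlap
-- (max(a,b) = a + b - min(a,b)); objective: simpler. Equal on association lists with distinct keys.


-- ===== PORT A =====
-- Python A: first loop over multiSet1's keys adding max of the two values on shared keys
-- (recording them in `visited`), else multiSet1's value; second loop adds multiSet2's values
-- for keys not visited.  `multiSet1[m1]` / `multiSet2[m2]` are ported as `getD _ 0`: the key is
-- always present (it comes from iterating that very dict), so this equals the Python lookup.
def GetUnionNum (multiSet1 : List (String × Int)) (multiSet2 : List (String × Int)) : Int :=
  let d1 := PySem.Dict.mk multiSet1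
  let d2 := PySem.Dict.mk multiSet2
  let st := d1.keys.foldl (fun (st : Int × PySem.Set String) m1 =>
      if d2.contains m1 then
        (st.1 + max (d1.getD m1 0) (d2.getD m1 0), PySem.Set.add st.2 m1)
      else
        (st.1 + d1.getD m1 0, st.2)) (0, PySem.Set.empty)
  d2.keys.foldl (fun total m2 =>
      if PySem.Set.contains st.2 m2 then total
      else total + d2.getD m2 0) st.1

-- ===== PORT B =====
-- Python B: overlap = sum of min(v, d2[k]) over items of multiSet1 whose key is in multiSet2;
-- result = sum(values1) + sum(values2) - overlap.
def GetUnionNum_alt (multiSet1 : List (String × Int)) (multiSet2 : List (String × Int)) : Int :=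
  let d2 := PySem.Dict.mk multiSet2
  let overlap := multiSet1.foldl (fun acc kv =>
      match d2.get? kv.1 with
      | some v2 => acc + min kv.2 v2
      | none => acc) 0
  multiSet1.foldl (fun s kv => s + kv.2) 0
    + multiSet2.foldl (fun s kv => s + kv.2) 0 - overlap

-- ===== PRECONDITION & SPEC =====
-- Pre_ requires distinct keys within each association list: the parameters encode Python dicts,
-- which cannot hold duplicate keys, so lists with repeated keys represent no input A ever receives.
def Pre_GetUnionNum (multiSet1 : List (String × Int)) (multiSet2 : List (String × Int)) : Prop :=
  (multiSet1.map Prod.fst).Nodup ∧ (multiSet2.map Prod.fst).Nodup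
instance (multiSet1 : List (String × Int)) (multiSet2 : List (String × Int)) : Decidable (Pre_GetUnionNum multiSet1 multiSet2) := by unfold Pre_GetUnionNum; infer_instance

def pvWitness_GetUnionNum : (List (String × Int)) × (List (String × Int)) :=
  ([("a", 2)], [("a", 3), ("b", 1)])

def Spec_GetUnionNum (multiSet1 : List (String × Int)) (multiSet2 : List (String × Int)) (out : Int) : Prop := out = GetUnionNum_alt multiSet1 multiSet2
instance (multiSet1 : List (String × Int)) (multiSet2 : List (String × Int)) (out : Int) : Decidable (Spec_GetUnionNum multiSet1 multiSet2 out) := by unfold Spec_GetUnionNum; infer_instance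

-- ===== CLAIM (what is proved, stated in full; the proofs are below) =====
def Claim_equal_GetUnionNum : Prop := ∀ (multiSet1 : List (String × Int)) (multiSet2 : List (String × Int)), Dom_GetUnionNum multiSet1 multiSet2 → Pre_GetUnionNum multiSet1 multiSet2 → Spec_GetUnionNum multiSet1 multiSet2 (GetUnionNum multiSet1 multiSet2)

-- ===== LEMMAS AND PROOFS =====

-- getD on a literal cons dict, unfolded one pair.
theorem pv_getD_mk_cons (p : String × Int) (rest : List (String × Int)) (x : String) :
    (PySem.Dict.mk (p :: rest)).getD x 0
      = if p.1 = x then p.2 else (PySem.Dict.mk rest).getD x 0 := by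
  rw [PySem.Dict.getD_eq_get?_getD, PySem.Dict.get?_mk_cons]
  by_cases h : p.1 = x <;> simp [h, PySem.Dict.getD_eq_get?_getD]

-- Sum of a single-key indicator over a nodup-key association list.
theorem pv_sum_single (m1 : List (String × Int)) (h1 : (m1.map Prod.fst).Nodup)
    (k : String) (v : Int) :
    (m1.map (fun kv => if kv.1 = k then v else 0)).sum
      = if k ∈ m1.map Prod.fst then v else 0 := by
  induction m1 with
  | nil => simp
  | cons p r ih =>
    rw [List.map_cons, List.nodup_cons] at h1
    obtain ⟨hp, hr⟩ := h1
    simp only [List.map_cons, List.sum_cons, List.mem_cons]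
    by_cases hk : p.1 = k
    · subst hk
      rw [ih hr, if_neg hp, if_pos rfl, if_pos (Or.inl rfl), add_zero]
    · rw [if_neg hk, ih hr, zero_add]
      by_cases hm : k ∈ r.map Prod.fst
      · rw [if_pos hm, if_pos (Or.inr hm)]
      · rw [if_neg hm, if_neg (by intro h; rcases h with h | h; exact hk h.symm; exact hm h)]

-- The cross sum: summing multiSet2's values over the shared keys, read from either side.
theorem pv_crossSum (m1 m2 : List (String × Int))
    (h1 : (m1.map Prod.fst).Nodup) (h2 : (m2.map Prod.fst).Nodup) :
    (m1.map (fun kv => if kv.1 ∈ m2.map Prod.fst then (PySem.Dict.mk m2).getD kv.1 0 else 0)).sum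
      = (m2.map (fun kv => if kv.1 ∈ m1.map Prod.fst then kv.2 else 0)).sum := by
  induction m2 with
  | nil => simp
  | cons p r ih =>
    rw [List.map_cons, List.nodup_cons] at h2
    obtain ⟨hp, hr⟩ := h2
    simp only [List.map_cons, List.sum_cons, List.mem_cons]
    have step : ∀ kv : String × Int,
        (if kv.1 = p.1 ∨ kv.1 ∈ r.map Prod.fst then (PySem.Dict.mk (p :: r)).getD kv.1 0 else 0)
          = (if kv.1 = p.1 then p.2 else 0)
            + (if kv.1 ∈ r.map Prod.fst then (PySem.Dict.mk r).getD kv.1 0 else 0) := by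
      intro kv
      rw [pv_getD_mk_cons]
      by_cases hkp : kv.1 = p.1
      · have hnr : kv.1 ∉ r.map Prod.fst := hkp ▸ hp
        rw [if_pos (Or.inl hkp), if_pos hkp.symm, if_pos hkp, if_neg hnr, add_zero]
      · have h2' : ¬ (p.1 = kv.1) := fun h => hkp h.symm
        rw [if_neg hkp]
        by_cases hm : kv.1 ∈ r.map Prod.fst
        · rw [if_pos (Or.inr hm), if_neg h2', if_pos hm, zero_add]
        · rw [if_neg (by intro h; rcases h with h | h; exact hkp h; exact hm h), if_neg hm, add_zero]
    calc (m1.map (fun kv => if kv.1 = p.1 ∨ kv.1 ∈ r.map Prod.fst then (PySem.Dict.mk (p :: r)).getD kv.1 0 else 0)).sum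
        = (m1.map (fun kv => (if kv.1 = p.1 then p.2 else 0)
            + (if kv.1 ∈ r.map Prod.fst then (PySem.Dict.mk r).getD kv.1 0 else 0))).sum := by
          exact congrArg List.sum (List.map_congr_left (fun kv _ => step kv))
      _ = (m1.map (fun kv => if kv.1 = p.1 then p.2 else 0)).sum
            + (m1.map (fun kv => if kv.1 ∈ r.map Prod.fst then (PySem.Dict.mk r).getD kv.1 0 else 0)).sum := by
          rw [← PySem.List.sum_map_add_int]
      _ = (if p.1 ∈ m1.map Prod.fst then p.2 else 0)
            + (r.map (fun kv => if kv.1 ∈ m1.map Prod.fst then kv.2 else 0)).sum := by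
          rw [pv_sum_single m1 h1, ih hr]

-- Sum of a three-term pointwise combination splits.
theorem pv_sum_sub3 (l : List (String × Int)) (f g h : String × Int → Int) :
    (l.map (fun x => f x + g x - h x)).sum
      = (l.map f).sum + (l.map g).sum - (l.map h).sum := by
  induction l with
  | nil => simp
  | cons p r ih => simp only [List.map_cons, List.sum_cons, ih]; ring

theorem pv_sum_sub2 (l : List (String × Int)) (f h : String × Int → Int) :
    (l.map (fun x => f x - h x)).sum = (l.map f).sum - (l.map h).sum := by
  induction l with
  | nil => simp
  | cons p r ih => simp only [List.map_cons, List.sum_cons, ih]; ring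

theorem pv_getD_self {l : List (String × Int)} (h : (l.map Prod.fst).Nodup)
    {kv : String × Int} (hm : kv ∈ l) : (PySem.Dict.mk l).getD kv.1 0 = kv.2 :=
  PySem.Dict.getD_of_mem_items (d := PySem.Dict.mk l) (by exact hm) h 0

-- A's first loop: the running total and the visited set, characterised together.
theorem pv_loop1 (d1 d2 : PySem.Dict String Int) (l : List String) (t : Int) (s : PySem.Set String) :
    l.foldl (fun (st : Int × PySem.Set String) k =>
        if d2.contains k then
          (st.1 + max (d1.getD k 0) (d2.getD k 0), PySem.Set.add st.2 k)
        else (st.1 + d1.getD k 0, st.2)) (t, s)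
      = (t + (l.map (fun k => if d2.contains k then max (d1.getD k 0) (d2.getD k 0)
                              else d1.getD k 0)).sum,
         l.foldl (fun s k => if d2.contains k then PySem.Set.add s k else s) s) := by
  induction l generalizing t s with
  | nil => simp
  | cons k r ih => by_cases hc : d2.contains k <;> simp [hc, ih, add_assoc]

-- A's second loop: adds d2's value for every key not in the visited set.
theorem pv_loop2 (d2 : PySem.Dict String Int) (V : PySem.Set String) (l : List String) (t : Int) :
    l.foldl (fun total k => if V.contains k then total else total + d2.getD k 0) t
      = t + (l.map (fun k => if V.contains k then 0 else d2.getD k 0)).sum := by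
  induction l generalizing t with
  | nil => simp
  | cons k r ih =>
    rw [List.foldl_cons, ih, List.map_cons, List.sum_cons]
    by_cases hc : V.contains k = true
    · rw [if_pos hc, if_pos hc, zero_add]
    · rw [if_neg hc, if_neg hc, add_assoc]

-- B's overlap loop: the match on get? as a sum of conditional minima.
theorem pv_overlap (d2 : PySem.Dict String Int) (l : List (String × Int)) (a : Int) :
    l.foldl (fun acc kv => match d2.get? kv.1 with
        | some v2 => acc + min kv.2 v2
        | none => acc) a
      = a + (l.map (fun kv => if d2.contains kv.1 then min kv.2 (d2.getD kv.1 0) else 0)).sum := by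
  induction l generalizing a with
  | nil => simp
  | cons kv r ih =>
    cases hg : d2.get? kv.1 with
    | none =>
      have hc : d2.contains kv.1 = false := by
        rw [PySem.Dict.contains_eq_isSome_get?, hg]; rfl
      simp [hg, hc, ih]
    | some w =>
      have hc : d2.contains kv.1 = true := by
        rw [PySem.Dict.contains_eq_isSome_get?, hg]; rfl
      have hd : d2.getD kv.1 0 = w := by
        rw [PySem.Dict.getD_eq_get?_getD, hg]; rfl
      simp [hg, hc, hd, ih, add_assoc]

-- ===== VERDICT (by name: the statement is the Claim_ definition above) =====
theorem GetUnionNum_spec : Claim_equal_GetUnionNum := by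
  intro m1 m2 _hdom hpre
  obtain ⟨h1, h2⟩ := hpre
  unfold Spec_GetUnionNum GetUnionNum GetUnionNum_alt
  simp only [PySem.Dict.keys]
  have hL := pv_loop1 (PySem.Dict.mk m1) (PySem.Dict.mk m2) (m1.map (fun x => x.1)) 0 PySem.Set.empty
  have hfst := congrArg Prod.fst hL
  have hsnd := congrArg Prod.snd hL
  simp only at hfst hsnd
  simp only [hfst, hsnd]
  rw [pv_loop2, PySem.List.foldl_add, PySem.List.foldl_add, pv_overlap]
  -- the visited set is the set of multiSet1-keys that occur in multiSet2
  have hV : (m1.map (fun x => x.1)).foldl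
      (fun s k => if (PySem.Dict.mk m2).contains k then PySem.Set.add s k else s) PySem.Set.empty
      = PySem.Set.ofList ((m1.map (fun x => x.1)).filter (fun k => (PySem.Dict.mk m2).contains k)) := by
    rw [PySem.List.foldl_if_eq_foldl_filter]
    rfl
  have hVmem : ∀ x : String,
      (((m1.map (fun x => x.1)).foldl
        (fun s k => if (PySem.Dict.mk m2).contains k then PySem.Set.add s k else s)
        PySem.Set.empty).contains x = true)
      ↔ (x ∈ m1.map Prod.fst ∧ (PySem.Dict.mk m2).contains x = true) := by
    intro x
    rw [hV, PySem.Set.contains_iff, PySem.Set.mem_ofList, List.mem_filter]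
  have hckeys2 : ∀ x : String, (PySem.Dict.mk m2).contains x = true ↔ x ∈ m2.map Prod.fst :=
    fun x => PySem.Dict.contains_iff_mem_keys (PySem.Dict.mk m2) x
  -- fuse maps over the key lists into maps over the pair lists
  rw [List.map_map, List.map_map]
  -- A's first sum = sum of values1 + shared-key d2-values - overlap (pointwise max = a + b - min)
  have hA1 : (m1.map ((fun k => if (PySem.Dict.mk m2).contains k = true
          then max ((PySem.Dict.mk m1).getD k 0) ((PySem.Dict.mk m2).getD k 0)
          else (PySem.Dict.mk m1).getD k 0) ∘ (fun x => x.1))).sum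
      = (m1.map Prod.snd).sum
        + (m1.map (fun kv => if kv.1 ∈ m2.map Prod.fst then (PySem.Dict.mk m2).getD kv.1 0 else 0)).sum
        - (m1.map (fun kv => if (PySem.Dict.mk m2).contains kv.1
              then min kv.2 ((PySem.Dict.mk m2).getD kv.1 0) else 0)).sum := by
    rw [← pv_sum_sub3]
    refine congrArg List.sum (List.map_congr_left ?_)
    intro kv hkv
    simp only [Function.comp]
    rw [pv_getD_self h1 hkv]
    by_cases hc : (PySem.Dict.mk m2).contains kv.1 = true
    · rw [if_pos hc, if_pos hc, if_pos ((hckeys2 kv.1).mp hc)]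
      rcases le_total kv.2 ((PySem.Dict.mk m2).getD kv.1 0) with hle | hle
      · rw [max_eq_right hle, min_eq_left hle]; ring
      · rw [max_eq_left hle, min_eq_right hle]; ring
    · rw [if_neg hc, if_neg hc, if_neg (fun hm => hc ((hckeys2 kv.1).mpr hm))]
      ring
  -- A's second sum = sum of values2 - values2 on keys shared with multiSet1
  have hA2 : (m2.map ((fun k => if ((m1.map (fun x => x.1)).foldl
          (fun s k => if (PySem.Dict.mk m2).contains k then PySem.Set.add s k else s)
          PySem.Set.empty).contains k = true then 0 else (PySem.Dict.mk m2).getD k 0)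
            ∘ (fun x => x.1))).sum
      = (m2.map Prod.snd).sum
        - (m2.map (fun kv => if kv.1 ∈ m1.map Prod.fst then kv.2 else 0)).sum := by
    rw [← pv_sum_sub2]
    refine congrArg List.sum (List.map_congr_left ?_)
    intro kv hkv
    simp only [Function.comp]
    have hc : (PySem.Dict.mk m2).contains kv.1 = true :=
      (hckeys2 kv.1).mpr (List.mem_map_of_mem hkv)
    by_cases hm : kv.1 ∈ m1.map Prod.fst
    · rw [if_pos ((hVmem kv.1).mpr ⟨hm, hc⟩), if_pos hm]; ring
    · rw [if_neg (fun hx => hm ((hVmem kv.1).mp hx).1), if_neg hm,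
        pv_getD_self h2 hkv]
      ring
  rw [hA1, hA2, pv_crossSum m1 m2 h1 h2]
  ring
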